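-- pv_equiv track=rewrite | github.com/Kinrokin/KT | KT_PROD_CLEANROOM/04_PROD_TEMPLE_V2/src/council/providers/adapter_abi_runtime.py | _require_str_list
-- ===== SOURCE A (Python) =====
-- from typing import Any, Dict, Iterable, List
--
-- class AdapterAbiError(RuntimeError):
--     pass
--
-- def _require_str_list(payload: Dict[str, Any], field: str) -> List[str]:
--     value = payload.get(field)
--     if not isinstance(value, list) or not value:
--         raise AdapterAbiError(f"{field} must be non-empty list of strings (fail-closed)")
--     out: List[str] = []
--     for item in value:
--         if not isinstance(item, str) or not item.strip():
--             raise AdapterAbiError(f"{field} must be non-empty list of strings (fail-closed)")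
--         out.append(item.strip())
--     return sorted(_unique(out))
--
-- def _unique(items: Iterable[str]) -> Iterable[str]:
--     seen = set()
--     for item in items:
--         if item not in seen:
--             seen.add(item)
--             yield item
-- ===== SOURCE B (Python) =====
-- from typing import Any, Dict, List
--
-- class AdapterAbiError(RuntimeError):
--     pass
--
-- def _dedup_adjacent(xs: List[str]) -> List[str]:
--     # xs is sorted: keep an element only when it differs from the previous one
--     out: List[str] = []
--     prev = None
--     for s in xs:
--         if s != prev:
--             out.append(s)
--             prev = s
--     return out
--
-- def _require_str_list(payload: Dict[str, Any], field: str) -> List[str]: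
--     value = payload.get(field)
--     if (not isinstance(value, list) or not value
--             or any(not isinstance(x, str) or not x.strip() for x in value)):
--         raise AdapterAbiError(f"{field} must be non-empty list of strings (fail-closed)")
--     return _dedup_adjacent(sorted(x.strip() for x in value))
-- ===== Notes on version B (the rewrite author's own statement) =====
-- stated objective: alternative
-- what changed: A validates item-by-item while building a stripped list, dedupes with a hash 'seen'-set generator and then sorts; B validates with a single any() guard, maps strip, sorts first and dedupes in one linear adjacency pass tracking only the previous kept element (no set).
import Mathlib
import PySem

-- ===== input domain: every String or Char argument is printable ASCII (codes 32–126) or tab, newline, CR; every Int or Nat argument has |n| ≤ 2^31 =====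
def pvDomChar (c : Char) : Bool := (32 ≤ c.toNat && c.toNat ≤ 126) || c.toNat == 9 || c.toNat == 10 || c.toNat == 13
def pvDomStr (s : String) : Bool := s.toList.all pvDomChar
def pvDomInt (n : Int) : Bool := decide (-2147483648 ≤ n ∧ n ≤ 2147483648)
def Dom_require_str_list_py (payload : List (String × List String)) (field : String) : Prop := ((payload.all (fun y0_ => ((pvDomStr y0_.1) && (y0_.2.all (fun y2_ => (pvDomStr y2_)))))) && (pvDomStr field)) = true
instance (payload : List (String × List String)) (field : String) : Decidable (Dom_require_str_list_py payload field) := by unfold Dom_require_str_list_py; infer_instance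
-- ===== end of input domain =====

-- B replaces A's validate-while-building loop + hash-set dedup + sort by a single any() validation
-- guard, map-strip, sort first, then a linear adjacency dedup tracking only the previous kept element.

-- ===== PORT A =====
-- A raises AdapterAbiError when the field is missing, the list is empty, or an item strips to "";
-- those inputs are excluded by Pre_ and the port returns [] there.
def require_str_list_py (payload : List (String × List String)) (field : String) : List String :=
  match (PySem.Dict.mk payload).get? field with
  | none => []
  | some value =>
    if value = [] then []
    else if value.all (fun item => !(PySem.Str.strip item == "")) then
      -- _unique: first occurrences in order (seen-set generator) = PySem.List.dedup
      PySem.List.sorted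
        (PySem.List.dedup (value.foldl (fun out item => out ++ [PySem.Str.strip item]) []))
        (fun x => x) false
    else []

-- ===== PORT B =====
def require_str_list_py_alt (payload : List (String × List String)) (field : String) : List String :=
  let value := ((PySem.Dict.mk payload).get? field).getD []
  if value.isEmpty || value.any (fun x => PySem.Str.strip x == "") then []
  else
    -- _dedup_adjacent(sorted(x.strip() for x in value))
    ((PySem.List.sorted (value.map (fun x => PySem.Str.strip x)) (fun x => x) false).foldl
      (fun st s => if some s ≠ st.1 then (some s, st.2 ++ [s]) else st)
      ((none : Option String), ([] : List String))).2

-- ===== PRECONDITION & SPEC =====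
-- Pre_ excludes exactly the inputs where A raises AdapterAbiError: missing field, empty list, or an item that strips to "".
def Pre_require_str_list_py (payload : List (String × List String)) (field : String) : Prop :=
  ((PySem.Dict.mk payload).get? field).getD [] ≠ [] ∧
  ∀ item ∈ ((PySem.Dict.mk payload).get? field).getD [], PySem.Str.strip item ≠ ""
instance (payload : List (String × List String)) (field : String) : Decidable (Pre_require_str_list_py payload field) := by unfold Pre_require_str_list_py; infer_instance
def pvWitness_require_str_list_py : (List (String × List String)) × String :=
  ([("k", ["b", " a ", "b"])], "k")
def Spec_require_str_list_py (payload : List (String × List String)) (field : String) (out : List String) : Prop := out = require_str_list_py_alt payload field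
instance (payload : List (String × List String)) (field : String) (out : List String) : Decidable (Spec_require_str_list_py payload field out) := by unfold Spec_require_str_list_py; infer_instance

-- ===== CLAIM (what is proved, stated in full; the proofs are below) =====
def Claim_equal_require_str_list_py : Prop := ∀ (payload : List (String × List String)) (field : String), Dom_require_str_list_py payload field → Pre_require_str_list_py payload field → Spec_require_str_list_py payload field (require_str_list_py payload field)

-- ===== LEMMAS AND PROOFS =====

-- mathematical model of B's adjacency-dedup loop
def adjDedup (prev : Option String) : List String → List String
  | [] => []
  | s :: l => if some s = prev then adjDedup prev l else s :: adjDedup (some s) l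

theorem foldl_pair_eq_adjDedup (l : List String) (prev : Option String) (out : List String) :
    (l.foldl (fun st s => if some s ≠ st.1 then (some s, st.2 ++ [s]) else st) (prev, out)).2
      = out ++ adjDedup prev l := by
  induction l generalizing prev out with
  | nil => simp [adjDedup]
  | cons s l ih =>
    simp only [List.foldl_cons, ne_eq]
    by_cases h : some s = prev
    · rw [if_neg (by simp [h]), adjDedup, if_pos h]
      exact ih prev out
    · rw [if_pos (by simp [h]), adjDedup, if_neg h, ih (some s) (out ++ [s])]
      simp

theorem foldl_append_eq_map (l : List String) (f : String → String) (acc : List String) :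
    l.foldl (fun out item => out ++ [f item]) acc = acc ++ l.map f := by
  induction l generalizing acc with
  | nil => simp
  | cons s l ih => simp [ih]

def prevLE : Option String → String → Prop
  | none, _ => True
  | some p, x => p ≤ x

theorem adjDedup_sorted (t : List String) (h : t.Pairwise (· ≤ ·)) :
    ∀ prev, (∀ x ∈ t, prevLE prev x) →
      (adjDedup prev t).Pairwise (· < ·) ∧
      (∀ x, x ∈ adjDedup prev t ↔ x ∈ t ∧ some x ≠ prev) := by
  induction t with
  | nil => intro prev _; simp [adjDedup]
  | cons s l ih =>
    intro prev hprev
    rcases List.pairwise_cons.mp h with ⟨hs, hl⟩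
    by_cases hp : some s = prev
    · have hle : ∀ x ∈ l, prevLE prev x := by
        intro x hx; rw [← hp]; exact hs x hx
      obtain ⟨hpw, hmem⟩ := ih hl prev hle
      rw [adjDedup, if_pos hp]
      refine ⟨hpw, fun x => ?_⟩
      rw [hmem]
      constructor
      · rintro ⟨hxl, hxp⟩; exact ⟨List.mem_cons_of_mem _ hxl, hxp⟩
      · rintro ⟨hxt, hxp⟩
        rcases List.mem_cons.mp hxt with he | hxl
        · exact absurd (he ▸ hp) hxp
        · exact ⟨hxl, hxp⟩
    · obtain ⟨hpw, hmem⟩ := ih hl (some s) (fun x hx => hs x hx)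
      rw [adjDedup, if_neg hp]
      have hsprev : some s ≠ prev := hp
      constructor
      · refine List.pairwise_cons.mpr ⟨fun y hy => ?_, hpw⟩
        obtain ⟨hyl, hys⟩ := (hmem y).mp hy
        exact lt_of_le_of_ne (hs y hyl) (fun he => hys (by rw [he]))
      · intro x
        rw [List.mem_cons, hmem, List.mem_cons]
        constructor
        · rintro (rfl | ⟨hxl, hxs⟩)
          · exact ⟨Or.inl rfl, hsprev⟩
          · refine ⟨Or.inr hxl, ?_⟩
            cases prev with
            | none => simp
            | some p =>
              have hps : p ≤ s := hprev s (List.mem_cons_self ..)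
              have hpls : p < s := lt_of_le_of_ne hps (fun he => hp (by rw [he]))
              have hplx : p < x := lt_of_lt_of_le hpls (hs x hxl)
              intro he
              exact absurd (Option.some.inj he) (ne_of_gt hplx)
        · rintro ⟨hxt, hxp⟩
          rcases hxt with rfl | hxl
          · exact Or.inl rfl
          · by_cases hxs : x = s
            · exact Or.inl hxs
            · exact Or.inr ⟨hxl, by simp [hxs]⟩

theorem main (stripped : List String) :
    PySem.List.sorted (PySem.List.dedup stripped) (fun x => x) false
      = adjDedup none (PySem.List.sorted stripped (fun x => x) false) := by
  set t := PySem.List.sorted stripped (fun x => x) false with ht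
  have hpair : t.Pairwise (· ≤ ·) := PySem.List.sorted_pairwise stripped (fun x => x)
  obtain ⟨hpw, hmem⟩ := adjDedup_sorted t hpair none (fun x _ => trivial)
  apply PySem.List.sorted_eq_of_perm_of_pairwise_lt
  · apply (List.perm_ext_iff_of_nodup (hpw.imp ne_of_lt) (PySem.List.nodup_dedup stripped)).mpr
    intro a
    rw [hmem, PySem.List.mem_dedup]
    simp [ht, PySem.List.mem_sorted]
  · exact hpw

-- ===== VERDICT (by name: the statement is the Claim_ definition above) =====
theorem require_str_list_py_spec : Claim_equal_require_str_list_py := by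
  intro payload field _ hpre
  obtain ⟨hne, hstrip⟩ := hpre
  unfold Spec_require_str_list_py require_str_list_py require_str_list_py_alt
  cases hval : (PySem.Dict.mk payload).get? field with
  | none => simp [hval] at hne
  | some value =>
    rw [hval] at hne hstrip
    simp only [Option.getD_some] at hne hstrip
    have hall : value.all (fun item => !(PySem.Str.strip item == "")) = true := by
      rw [List.all_eq_true]; intro item hitem; simpa using hstrip item hitem
    have hany : value.any (fun x => PySem.Str.strip x == "") = false := by
      rw [List.any_eq_false]; intro x hx; simpa using hstrip x hx
    simp only [Option.getD_some, if_neg hne, if_pos hall,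
      List.isEmpty_eq_false_iff.mpr hne, hany, Bool.or_self, if_neg Bool.false_ne_true]
    rw [foldl_append_eq_map, List.nil_append, foldl_pair_eq_adjDedup, List.nil_append]
    exact main (value.map (fun x => PySem.Str.strip x))
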